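-- pv_equiv track=rewrite | github.com/Ghostkeeper/AdventOfCode | cargo_stacks.py | read_cargo_stacks
-- ===== SOURCE A (Python) =====
-- def read_cargo_stacks(input):
-- 	"""
-- 	From the start of the input, read the cargo on the cargo stacks.
-- 	:param input: A puzzle input, starting with cargo stacks.
-- 	:return: A number of stacks, each a list with items in it (of a single character).
-- 	"""
-- 	num_stacks = int(len(input[0]) / 4)  # One space and 3 characters per stack, so divide by 4.
-- 	stacks = [[] for _ in range(num_stacks)]  # Create empty stacks.
--
-- 	for line in input:
-- 		if line[0] == " ":  # End of stack input data.
-- 			break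
-- 		for i in range(num_stacks):
-- 			item = line[i * 4 + 1]
-- 			if item == " ":  # Empty, the stack isn't this high.
-- 				continue
-- 			stacks[i].insert(0, item)  # Put at bottom of stack.
-- 	return stacks
-- ===== SOURCE B (Python) =====
-- def read_cargo_stacks(input):
-- 	"""
-- 	From the start of the input, read the cargo on the cargo stacks.
-- 	:param input: A puzzle input, starting with cargo stacks.
-- 	:return: A number of stacks, each a list with items in it (of a single character).
-- 	"""
-- 	num_stacks = int(len(input[0]) / 4)
-- 	cargo = []  # The block of cargo lines, up to the first line starting with a space.
-- 	for line in input: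
-- 		if line[0] == " ":
-- 			break
-- 		cargo.append(line)
-- 	# Build each stack independently, bottom-up, from its own column.
-- 	return [[line[i * 4 + 1] for line in reversed(cargo) if line[i * 4 + 1] != " "]
-- 			for i in range(num_stacks)]
-- ===== Notes on version B (the rewrite author's own statement) =====
-- stated objective: alternative
-- what changed: B first cuts off the cargo block (lines before the first line starting with a space), then builds each stack independently bottom-up from its own column with a per-stack comprehension over the reversed block, instead of A's row-by-row growth of all stacks via insert(0, item).
import Mathlib
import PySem

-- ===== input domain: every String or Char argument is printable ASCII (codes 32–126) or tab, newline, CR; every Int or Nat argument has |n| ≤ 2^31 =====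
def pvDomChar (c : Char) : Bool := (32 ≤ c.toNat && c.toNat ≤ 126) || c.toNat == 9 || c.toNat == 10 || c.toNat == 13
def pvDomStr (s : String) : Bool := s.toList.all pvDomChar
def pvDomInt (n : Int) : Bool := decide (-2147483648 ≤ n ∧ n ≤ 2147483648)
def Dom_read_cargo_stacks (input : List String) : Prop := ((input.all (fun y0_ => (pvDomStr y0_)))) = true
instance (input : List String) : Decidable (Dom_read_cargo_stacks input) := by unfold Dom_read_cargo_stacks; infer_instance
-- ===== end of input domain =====

-- B re-decomposes A: it first cuts off the cargo block, then builds each stack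
-- independently from its own column (transpose), instead of growing all stacks
-- row by row with insert(0, …); objective: alternative decomposition.

-- ===== PORT A =====
-- one inner-loop body: item = line[i*4+1]; if item == " ": continue; stacks[i].insert(0, item)
def rcsItemStep (cs : List Char) (i : Nat) (st : List (List String)) : List (List String) :=
  match cs[4 * i + 1]? with
  | none => st          -- Python raises IndexError here; such inputs are outside Pre_
  | some item => if item = ' ' then st else st.modify i (fun s => String.ofList [item] :: s)

-- for i in range(num_stacks): …
def rcsInner (numStacks : Nat) (cs : List Char) (st : List (List String)) : List (List String) :=
  (List.range numStacks).foldl (fun st i => rcsItemStep cs i st) st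

-- for line in input: if line[0] == " ": break; …
def rcsLoop (numStacks : Nat) : List String → List (List String) → List (List String)
  | [], st => st
  | line :: rest, st =>
    if line.toList.head? = some ' ' then st   -- line[0] on an empty line raises in Python; outside Pre_
    else rcsLoop numStacks rest (rcsInner numStacks line.toList st)

def read_cargo_stacks (input : List String) : List (List String) :=
  match input with
  | [] => []            -- Python raises IndexError on input[0]; outside Pre_
  | first :: _ =>
    let numStacks := first.toList.length / 4   -- int(len(input[0]) / 4)
    rcsLoop numStacks input (List.replicate numStacks [])

-- ===== PORT B =====
-- the cargo-collecting loop of Source B: append lines until one starts with " "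
def rcsCargo : List String → List String
  | [] => []
  | line :: rest => if line.toList.head? = some ' ' then [] else line :: rcsCargo rest

-- the comprehension filter/map: line[i*4+1] kept when != " "
def rcsPick (i : Nat) (line : String) : Option String :=
  match line.toList[4 * i + 1]? with
  | none => none        -- Python raises IndexError here; such inputs are outside Pre_
  | some item => if item ≠ ' ' then some (String.ofList [item]) else none

def read_cargo_stacks_alt (input : List String) : List (List String) :=
  match input with
  | [] => []            -- Python raises IndexError on input[0]; outside Pre_
  | first :: _ =>
    let numStacks := first.toList.length / 4
    let cargo := rcsCargo input
    (List.range numStacks).map (fun i => cargo.reverse.filterMap (rcsPick i))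

-- ===== PRECONDITION & SPEC =====
-- Pre_ excludes exactly the inputs where Python A raises IndexError: an empty input
-- (input[0]), an empty line inside the cargo block (line[0]), or a cargo line too
-- short for the column indices i*4+1 read by the inner loop.
def Pre_read_cargo_stacks (input : List String) : Prop :=
  input ≠ [] ∧
  ∀ l ∈ input.takeWhile (fun l => l.toList.head? ≠ some ' '),
    1 ≤ l.toList.length ∧ 4 * ((input.headD "").toList.length / 4) ≤ l.toList.length + 2
instance (input : List String) : Decidable (Pre_read_cargo_stacks input) := by
  unfold Pre_read_cargo_stacks; infer_instance

def pvWitness_read_cargo_stacks : List String :=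
  ["[A] [B] ", " 1   2", "move 1 from 2 to 1"]

def Spec_read_cargo_stacks (input : List String) (out : List (List String)) : Prop := out = read_cargo_stacks_alt input
instance (input : List String) (out : List (List String)) : Decidable (Spec_read_cargo_stacks input out) := by unfold Spec_read_cargo_stacks; infer_instance

-- ===== CLAIM (what is proved, stated in full; the proofs are below) =====
def Claim_equal_read_cargo_stacks : Prop := ∀ (input : List String), Dom_read_cargo_stacks input → Pre_read_cargo_stacks input → Spec_read_cargo_stacks input (read_cargo_stacks input)

-- ===== LEMMAS AND PROOFS =====

theorem rcsItemStep_get (cs : List Char) (j : Nat) (st : List (List String)) (i : Nat) :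
    (rcsItemStep cs j st)[i]? =
      if i = j then st[i]?.map (fun s => ((rcsPick j (String.ofList cs)).toList : List String) ++ s)
      else st[i]? := by
  unfold rcsItemStep rcsPick
  simp only [String.toList_ofList]
  cases h : cs[4 * j + 1]? with
  | none => simp
  | some c =>
    by_cases hc : c = ' '
    · subst hc; simp
    · simp only [if_neg hc, if_pos (by simp [hc] : ¬c = ' ' )]
      rw [List.getElem?_modify]
      by_cases hij : i = j
      · subst hij; simp
      · simp [Ne.symm hij, hij]

theorem rcsInner_get (ns : Nat) (cs : List Char) (st : List (List String)) (i : Nat) :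
    (rcsInner ns cs st)[i]? =
      if i < ns then st[i]?.map (fun s => ((rcsPick i (String.ofList cs)).toList : List String) ++ s)
      else st[i]? := by
  induction ns generalizing st with
  | zero => simp [rcsInner]
  | succ n ih =>
    unfold rcsInner at *
    rw [List.range_succ, List.foldl_append]
    simp only [List.foldl_cons, List.foldl_nil]
    rw [rcsItemStep_get, ih]
    by_cases hin : i = n
    · subst hin
      rw [if_pos rfl, if_neg (Nat.lt_irrefl i), if_pos (Nat.lt_succ_self i)]
    · by_cases hlt : i < n
      · rw [if_neg hin, if_pos hlt, if_pos (by omega)]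
      · rw [if_neg hin, if_neg hlt, if_neg (by omega)]

theorem rcsLoop_get (ns : Nat) (lines : List String) (st : List (List String)) (i : Nat) :
    (rcsLoop ns lines st)[i]? =
      if i < ns then st[i]?.map (fun s => ((rcsCargo lines).reverse.filterMap (rcsPick i)) ++ s)
      else st[i]? := by
  induction lines generalizing st with
  | nil => simp [rcsLoop, rcsCargo]
  | cons line rest ih =>
    unfold rcsLoop rcsCargo
    by_cases hb : line.toList.head? = some ' '
    · simp [hb]
    · rw [if_neg hb, if_neg hb, ih]
      have hline : rcsPick i (String.ofList line.toList) = rcsPick i line := by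
        simp [rcsPick]
      by_cases hlt : i < ns
      · rw [if_pos hlt, if_pos hlt, rcsInner_get, if_pos hlt, hline]
        cases st[i]? <;> simp [List.filterMap_append, List.filterMap_cons]
        cases rcsPick i line <;> simp
      · rw [if_neg hlt, if_neg hlt, rcsInner_get, if_neg hlt]

theorem ports_eq (input : List String) :
    read_cargo_stacks input = read_cargo_stacks_alt input := by
  cases input with
  | nil => rfl
  | cons first rest =>
    unfold read_cargo_stacks read_cargo_stacks_alt
    apply List.ext_getElem?
    intro i
    rw [rcsLoop_get]
    simp only [List.getElem?_map, List.getElem?_range, List.getElem?_replicate,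
      String.length_toList]
    split <;> rename_i h <;> simp [h]

-- ===== VERDICT (by name: the statement is the Claim_ definition above) =====
theorem read_cargo_stacks_spec : Claim_equal_read_cargo_stacks := by
  intro input _ _
  unfold Spec_read_cargo_stacks
  exact ports_eq input
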